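-- pv_equiv track=rewrite | github.com/4b112103/auto-grading-practicing | practicing/week07/prob02/main.py | sign_pairs
-- ===== SOURCE A (Python) =====
-- def sign_pairs(numbers):
--     pass
--     #----------------------
--     # write your code here
--     #----------------------
--     num_list = [int(num) for num in numbers.split()]
--
--     result = []
--
--     i = 0
--     while i < len(num_list) - 1:
--         pair = [num_list[i], num_list[i + 1]]
--         if (pair[0] > 0 and pair[1] > 0) or (pair[0] < 0 and pair[1] < 0):
--             result.append(pair)
--             i += 2
--         else:
--             i += 1
--
--     return result
-- ===== SOURCE B (Python) =====
-- def sign_pairs(numbers):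
--     num_list = [int(num) for num in numbers.split()]
--     runs = []
--     for x in num_list:
--         if runs and _sgn(x) != 0 and _sgn(x) == _sgn(runs[-1][-1]):
--             runs[-1].append(x)
--         else:
--             runs.append([x])
--     result = []
--     for run in runs:
--         if _sgn(run[0]) != 0:
--             result += _chunk(run)
--     return result
--
-- def _sgn(x):
--     return 1 if x > 0 else (-1 if x < 0 else 0)
--
-- def _chunk(run):
--     if len(run) < 2:
--         return []
--     return [[run[0], run[1]]] + _chunk(run[2:])
-- ===== Notes on version B (the rewrite author's own statement) =====
-- stated objective: alternative
-- what changed: B is a two-stage algorithm: it first groups the parsed numbers into maximal runs of equal nonzero sign (zeros as singleton runs), then emits non-overlapping adjacent pairs from each nonzero-sign run by structural recursion, instead of A's single index-based while-loop with +1/+2 jumps.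
import Mathlib
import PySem

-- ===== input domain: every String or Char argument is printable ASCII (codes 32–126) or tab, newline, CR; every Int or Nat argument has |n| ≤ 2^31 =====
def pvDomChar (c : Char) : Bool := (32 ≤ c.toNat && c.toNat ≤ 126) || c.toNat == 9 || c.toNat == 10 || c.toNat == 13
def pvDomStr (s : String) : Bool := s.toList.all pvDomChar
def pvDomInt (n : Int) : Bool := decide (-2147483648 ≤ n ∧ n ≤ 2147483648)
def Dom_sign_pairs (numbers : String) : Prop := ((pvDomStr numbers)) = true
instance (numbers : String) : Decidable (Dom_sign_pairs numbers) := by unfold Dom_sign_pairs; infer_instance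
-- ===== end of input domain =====

-- B replaces A's index-based while-loop by a two-stage algorithm: group into maximal
-- runs of equal nonzero sign, then chunk each run into adjacent pairs recursively;
-- return values agree on Pre_ (no mutation involved).

-- ===== PORT A =====
-- A's while-loop: i advances by 2 after emitting a pair, by 1 otherwise.
def signLoopA (l : List Int) (i : Nat) (result : List (List Int)) : List (List Int) :=
  if i + 1 < l.length then
    let pair := [l.getD i 0, l.getD (i + 1) 0]
    if (l.getD i 0 > 0 ∧ l.getD (i + 1) 0 > 0) ∨ (l.getD i 0 < 0 ∧ l.getD (i + 1) 0 < 0) then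
      signLoopA l (i + 2) (result ++ [pair])
    else
      signLoopA l (i + 1) result
  else result
termination_by l.length - i

def sign_pairs (numbers : String) : List (List Int) :=
  signLoopA ((PySem.Str.split₀ numbers).map (fun t => (PySem.Int.ofStr? t).getD 0)) 0 []

-- ===== PORT B =====
-- _sgn
def sgnB (x : Int) : Int := if x > 0 then 1 else if x < 0 then -1 else 0

-- _chunk (structural recursion, two elements at a time)
def chunkB : List Int → List (List Int)
  | a :: b :: t => [a, b] :: chunkB t
  | _ => []

-- body of B's first loop: extend the last run or start a new one (runs[-1].append(x) ported
-- as rebuilding the list with its last run extended)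
def runStepB (runs : List (List Int)) (x : Int) : List (List Int) :=
  if runs ≠ [] ∧ sgnB x ≠ 0 ∧ sgnB x = sgnB ((runs.getLastD []).getLastD 0) then
    runs.dropLast ++ [(runs.getLastD []) ++ [x]]
  else runs ++ [[x]]

-- body of B's second loop
def emitStepB (acc : List (List Int)) (run : List Int) : List (List Int) :=
  if sgnB (run.headD 0) ≠ 0 then acc ++ chunkB run else acc

def sign_pairs_alt (numbers : String) : List (List Int) :=
  let l := (PySem.Str.split₀ numbers).map (fun t => (PySem.Int.ofStr? t).getD 0)
  (l.foldl runStepB []).foldl emitStepB []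

-- ===== PRECONDITION & SPEC =====
-- Pre_ excludes exactly the inputs where int() raises ValueError on some whitespace-split token.
def Pre_sign_pairs (numbers : String) : Prop :=
  (PySem.Str.split₀ numbers).all (fun t => (PySem.Int.ofStr? t).isSome) = true
instance (numbers : String) : Decidable (Pre_sign_pairs numbers) := by
  unfold Pre_sign_pairs; infer_instance

def pvWitness_sign_pairs : String := "1 2 -3 -4 0 5"

def Spec_sign_pairs (numbers : String) (out : List (List Int)) : Prop := out = sign_pairs_alt numbers
instance (numbers : String) (out : List (List Int)) : Decidable (Spec_sign_pairs numbers out) := by unfold Spec_sign_pairs; infer_instance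

-- ===== CLAIM (what is proved, stated in full; the proofs are below) =====
def Claim_equal_sign_pairs : Prop := ∀ (numbers : String), Dom_sign_pairs numbers → Pre_sign_pairs numbers → Spec_sign_pairs numbers (sign_pairs numbers)

-- ===== LEMMAS AND PROOFS =====

-- common characterisation: greedy same-sign pairing of adjacent elements
def greedy : List Int → List (List Int)
  | a :: b :: t =>
      if (a > 0 ∧ b > 0) ∨ (a < 0 ∧ b < 0) then [a, b] :: greedy t else greedy (b :: t)
  | _ => []

theorem greedy_short (l : List Int) (h : l.length ≤ 1) : greedy l = [] := by
  match l, h with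
  | [], _ => rfl
  | [a], _ => rfl

theorem drop_two (l : List Int) (i : Nat) (h : i + 1 < l.length) :
    l.drop i = l.getD i 0 :: l.getD (i + 1) 0 :: l.drop (i + 2) := by
  have h0 : i < l.length := by omega
  rw [List.drop_eq_getElem_cons h0, List.drop_eq_getElem_cons h,
    List.getD_eq_getElem l 0 h0, List.getD_eq_getElem l 0 h]

theorem loopA_eq (l : List Int) (i : Nat) (res : List (List Int)) :
    signLoopA l i res = res ++ greedy (l.drop i) := by
  induction i, res using signLoopA.induct l with
  | case1 i res h pair hc ih =>
      rw [signLoopA]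
      simp only [if_pos h, if_pos hc]
      rw [ih, drop_two l i h, greedy, if_pos hc]
      simp only [List.append_assoc, List.singleton_append]
      rfl
  | case2 i res h hc ih =>
      rw [signLoopA]
      simp only [if_pos h, if_neg hc]
      have e1 : l.drop (i + 1) = l.getD (i + 1) 0 :: l.drop (i + 2) := by
        rw [List.drop_eq_getElem_cons h, List.getD_eq_getElem l 0 h]
      rw [ih, drop_two l i h, greedy, if_neg hc, e1]
  | case3 i res h =>
      rw [signLoopA]
      simp only [if_neg h]
      rw [greedy_short _ (by simp [List.length_drop]; omega)]
      simp

-- sign facts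
theorem sgn_pair_iff (a b : Int) :
    ((a > 0 ∧ b > 0) ∨ (a < 0 ∧ b < 0)) ↔ (sgnB a = sgnB b ∧ sgnB a ≠ 0) := by
  unfold sgnB; split_ifs <;> simp_all <;> omega

theorem greedy_zero_head (a : Int) (h : sgnB a = 0) (rest : List Int) :
    greedy (a :: rest) = greedy rest := by
  have ha : ¬ a > 0 ∧ ¬ a < 0 := by unfold sgnB at h; split_ifs at h <;> omega
  match rest with
  | [] => simp [greedy]
  | b :: t =>
      rw [greedy, if_neg]
      intro hc; rcases hc with ⟨h1, _⟩ | ⟨h1, _⟩ <;> exact absurd h1 (by omega)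

-- greedy on a same-nonzero-sign run followed by a non-matching element
theorem greedy_run_append (s : Int) (hs : s ≠ 0) :
    ∀ (r : List Int), (∀ a ∈ r, sgnB a = s) →
    ∀ (x : Int) (t : List Int), sgnB x ≠ s →
    greedy (r ++ x :: t) = chunkB r ++ greedy (x :: t)
  | [], _, x, t, _ => by simp [chunkB]
  | [a], hr, x, t, hx => by
      have hnc : ¬((a > 0 ∧ x > 0) ∨ (a < 0 ∧ x < 0)) := by
        rw [sgn_pair_iff]
        rintro ⟨h1, -⟩
        exact hx (by rw [← h1, hr a (by simp)])
      rw [List.cons_append, List.nil_append, greedy, if_neg hnc]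
      simp [chunkB]
  | a :: b :: r', hr, x, t, hx => by
      have ha := hr a (by simp); have hb := hr b (by simp)
      rw [List.cons_append, List.cons_append, greedy, if_pos, chunkB]
      · rw [greedy_run_append s hs r' (fun c hc => hr c (by simp [hc])) x t hx]
        simp
      · rw [sgn_pair_iff]; exact ⟨by rw [ha, hb], by rw [ha]; exact hs⟩

-- greedy on a pure run (no tail)
theorem greedy_run (s : Int) (hs : s ≠ 0) :
    ∀ (r : List Int), (∀ a ∈ r, sgnB a = s) → greedy r = chunkB r
  | [], _ => rfl
  | [a], _ => rfl
  | a :: b :: r', hr => by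
      rw [greedy, if_pos, chunkB, greedy_run s hs r' (fun c hc => hr c (by simp [hc]))]
      rw [sgn_pair_iff]
      exact ⟨by rw [hr a (by simp), hr b (by simp)], by rw [hr a (by simp)]; exact hs⟩

theorem greedy_zero_run :
    ∀ (r : List Int), (∀ a ∈ r, sgnB a = 0) → ∀ (t : List Int), greedy (r ++ t) = greedy t
  | [], _, t => by simp
  | a :: r', hr, t => by
      rw [List.cons_append, greedy_zero_head a (hr a (by simp)),
        greedy_zero_run r' (fun c hc => hr c (by simp [hc])) t]

-- proof-side recursive form of B's run-building loop
def buildFrom (r : List Int) : List Int → List (List Int)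
  | [] => [r]
  | x :: t =>
      if sgnB x ≠ 0 ∧ sgnB x = sgnB (r.getLastD 0) then buildFrom (r ++ [x]) t
      else r :: buildFrom [x] t

theorem foldl_runStepB (l : List Int) :
    ∀ (rs : List (List Int)) (r : List Int),
      List.foldl runStepB (rs ++ [r]) l = rs ++ buildFrom r l := by
  induction l with
  | nil => intro rs r; rfl
  | cons x t ih =>
      intro rs r
      rw [List.foldl_cons, runStepB, buildFrom]
      by_cases hc : sgnB x ≠ 0 ∧ sgnB x = sgnB (r.getLastD 0)
      · rw [if_pos, if_pos hc]
        · rw [List.dropLast_concat, List.getLastD_concat, ← ih rs (r ++ [x])]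
        · refine ⟨by simp, ?_⟩
          rwa [List.getLastD_concat]
      · rw [if_neg, if_neg hc]
        · have : rs ++ [r] ++ [[x]] = (rs ++ [r]) ++ [[x]] := by simp
          rw [this, ih (rs ++ [r]) [x], List.append_assoc]
          rfl
        · intro ⟨_, h2, h3⟩
          rw [List.getLastD_concat] at h3
          exact hc ⟨h2, h3⟩

-- B's second loop as a flatMap
def emitG (run : List Int) : List (List Int) :=
  if sgnB (run.headD 0) ≠ 0 then chunkB run else []

theorem foldl_emitStepB (runs : List (List Int)) :
    ∀ acc, runs.foldl emitStepB acc = acc ++ runs.flatMap emitG := by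
  induction runs with
  | nil => simp
  | cons r rest ih =>
      intro acc
      rw [List.foldl_cons, List.flatMap_cons, emitStepB]
      by_cases h : sgnB (r.headD 0) ≠ 0
      · rw [if_pos h, ih, emitG, if_pos h]; simp
      · rw [if_neg h, ih, emitG, if_neg h]; simp

-- the main invariant: building runs from a current nonempty run r then emitting
-- equals greedy on r ++ remaining input
theorem buildFrom_greedy (l : List Int) :
    ∀ (r : List Int), r ≠ [] → (∀ a ∈ r, sgnB a = sgnB (r.getLastD 0)) →
    (buildFrom r l).flatMap emitG = greedy (r ++ l) := by
  induction l with
  | nil =>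
      intro r hne hr
      rw [buildFrom]
      have hhead : r.headD 0 ∈ r := by
        match r, hne with | a :: t, _ => simp
      simp only [List.flatMap_cons, List.flatMap_nil, List.append_nil, emitG]
      by_cases hs : sgnB (r.getLastD 0) = 0
      · rw [if_neg (by rw [hr _ hhead]; simpa using hs)]
        have h0 := greedy_zero_run r (fun a ha => by rw [hr a ha]; exact hs) []
        rw [List.append_nil] at h0
        exact h0.symm
      · rw [if_pos (by rw [hr _ hhead]; exact hs)]
        exact (greedy_run _ hs r hr).symm
  | cons x t ih =>
      intro r hne hr
      rw [buildFrom]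
      by_cases hc : sgnB x ≠ 0 ∧ sgnB x = sgnB (r.getLastD 0)
      · rw [if_pos hc, ih (r ++ [x]) (by simp) ?_]
        · simp
        · intro a ha
          rw [List.getLastD_concat]
          rcases List.mem_append.mp ha with h | h
          · rw [hr a h, hc.2]
          · simp at h; rw [h]
      · rw [if_neg hc, List.flatMap_cons, ih [x] (by simp) (by simp)]
        have hhead : r.headD 0 ∈ r := by
          match r, hne with | a :: t, _ => simp
        by_cases hs : sgnB (r.getLastD 0) = 0
        · rw [emitG, if_neg (by rw [hr _ hhead]; simpa using hs), List.nil_append,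
            greedy_zero_run r (fun a ha => by rw [hr a ha]; exact hs) (x :: t),
            List.singleton_append]
        · have hx : sgnB x ≠ sgnB (r.getLastD 0) := by
            intro h
            by_cases h0 : sgnB x = 0
            · exact hs (h ▸ h0)
            · exact hc ⟨h0, h⟩
          rw [emitG, if_pos (by rw [hr _ hhead]; exact hs),
            greedy_run_append _ hs r (fun a ha => hr a ha) x t (fun h => hx h),
            List.singleton_append]

theorem alt_eq_greedy (l : List Int) :
    (l.foldl runStepB []).foldl emitStepB [] = greedy l := by
  match l with
  | [] => rfl
  | x :: t =>
      rw [List.foldl_cons, runStepB, if_neg (by intro ⟨h, _⟩; exact h rfl)]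
      have : ([] : List (List Int)) ++ [[x]] = [] ++ [[x]] := rfl
      rw [show ([] : List (List Int)) ++ [[x]] = [] ++ [[x]] from rfl,
        foldl_runStepB t [] [x], List.nil_append,
        foldl_emitStepB, List.nil_append,
        buildFrom_greedy t [x] (by simp) (by simp), List.singleton_append]

-- ===== VERDICT (by name: the statement is the Claim_ definition above) =====
theorem sign_pairs_spec : Claim_equal_sign_pairs := by
  intro numbers _ _
  unfold Spec_sign_pairs sign_pairs sign_pairs_alt
  rw [loopA_eq, alt_eq_greedy]
  simp
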